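-- pv_equiv track=rewrite | github.com/gotham29/htm-monitor | htm-monitor/src/demo/analyze_run.py | _episodes_from_boolean
-- ===== SOURCE A (Python) =====
-- from typing import Any, Dict, List, Optional, Sequence, Tuple, Set
--
-- def _episodes_from_boolean(mask: Sequence[bool], t_index: Sequence[int]) -> List[Tuple[int, int]]:
--     """
--     Convert a boolean mask aligned to t_index into contiguous [start_t, end_t] episodes (inclusive).
--     Assumes t_index is increasing by 1; if not, still works but episode gaps are based on adjacency in the list.
--     """
--     eps: List[Tuple[int, int]] = []
--     start: Optional[int] = None
--     prev_t: Optional[int] = None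
--     for on, t in zip(mask, t_index):
--         if on and start is None:
--             start = t
--             prev_t = t
--             continue
--         if on and start is not None:
--             # continue episode if adjacent in index
--             if prev_t is not None and t == prev_t + 1:
--                 prev_t = t
--                 continue
--             # break episode if gap
--             eps.append((start, prev_t if prev_t is not None else start))
--             start = t
--             prev_t = t
--             continue
--         if (not on) and start is not None:
--             eps.append((start, prev_t if prev_t is not None else start))
--             start = None
--             prev_t = None
--     if start is not None:
--         eps.append((start, prev_t if prev_t is not None else start))
--     return eps
-- ===== SOURCE B (Python) =====
-- def _episodes_from_boolean(mask, t_index):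
--     # Boundary-marking decomposition: mark episode starts and ends by looking
--     # at list neighbours, then pair them up (no threaded start/prev state).
--     rows = list(zip(mask, t_index))
--     prevs = [None] + rows[:-1]
--     nexts = rows[1:] + [None]
--     starts = [t for (on, t), p in zip(rows, prevs)
--               if on and not (p is not None and p[0] and t == p[1] + 1)]
--     ends = [t for (on, t), nx in zip(rows, nexts)
--             if on and not (nx is not None and nx[0] and nx[1] == t + 1)]
--     return list(zip(starts, ends))
-- ===== Notes on version B (the rewrite author's own statement) =====
-- stated objective: alternative
-- what changed: Replaces the single stateful loop threading start/prev_t accumulators with a boundary-marking pass: episode starts and ends are detected independently from each element's list neighbours (shifted copies of the rows) and then zipped into pairs.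
import Mathlib
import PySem

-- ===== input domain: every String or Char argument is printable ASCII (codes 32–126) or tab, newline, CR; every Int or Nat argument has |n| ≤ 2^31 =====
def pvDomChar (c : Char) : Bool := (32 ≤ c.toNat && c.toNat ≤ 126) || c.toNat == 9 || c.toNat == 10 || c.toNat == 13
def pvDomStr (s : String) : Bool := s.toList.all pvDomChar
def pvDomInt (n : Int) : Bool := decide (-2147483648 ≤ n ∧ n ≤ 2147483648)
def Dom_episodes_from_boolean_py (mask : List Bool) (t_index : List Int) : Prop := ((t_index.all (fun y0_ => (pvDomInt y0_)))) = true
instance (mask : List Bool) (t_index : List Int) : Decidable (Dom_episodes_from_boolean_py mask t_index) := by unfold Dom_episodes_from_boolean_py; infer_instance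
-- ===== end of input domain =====

-- B replaces A's stateful accumulator loop by a neighbour-based boundary-marking
-- pass (starts and ends detected independently, then zipped); same O(n) cost.

-- ===== PORT A =====
-- literal transliteration of A's loop: state (eps, start, prev_t) threaded through the zipped rows
def goA : List (Bool × Int) → List (Int × Int) → Option Int → Option Int → List (Int × Int)
  | [], eps, start, prev =>
    match start with
    | none => eps
    | some s => eps ++ [(s, prev.getD s)]
  | (on, t) :: rs, eps, start, prev =>
    match on, start with
    | true, none => goA rs eps (some t) (some t)
    | true, some s =>
      match prev with
      | some p =>
        if t = p + 1 then goA rs eps (some s) (some t)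
        else goA rs (eps ++ [(s, p)]) (some t) (some t)
      | none => goA rs (eps ++ [(s, s)]) (some t) (some t)
    | false, some s => goA rs (eps ++ [(s, prev.getD s)]) none none
    | false, none => goA rs eps none prev

def episodes_from_boolean_py (mask : List Bool) (t_index : List Int) : List (Int × Int) :=
  goA (mask.zip t_index) [] none none

-- ===== PORT B =====
def prevAdj (t : Int) : Option (Bool × Int) → Bool
  | some pr => pr.1 && decide (t = pr.2 + 1)
  | none => false

def nextAdj (t : Int) : Option (Bool × Int) → Bool
  | some nx => nx.1 && decide (nx.2 = t + 1)
  | none => false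

def episodes_from_boolean_py_alt (mask : List Bool) (t_index : List Int) : List (Int × Int) :=
  let rows := mask.zip t_index
  let prevs : List (Option (Bool × Int)) := none :: rows.dropLast.map some
  let nexts : List (Option (Bool × Int)) := (rows.drop 1).map some ++ [none]
  let starts := ((rows.zip prevs).filter (fun x => x.1.1 && !prevAdj x.1.2 x.2)).map (fun x => x.1.2)
  let ends := ((rows.zip nexts).filter (fun x => x.1.1 && !nextAdj x.1.2 x.2)).map (fun x => x.1.2)
  starts.zip ends

-- ===== PRECONDITION & SPEC =====
def Spec_episodes_from_boolean_py (mask : List Bool) (t_index : List Int) (out : List (Int × Int)) : Prop := out = episodes_from_boolean_py_alt mask t_index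
instance (mask : List Bool) (t_index : List Int) (out : List (Int × Int)) : Decidable (Spec_episodes_from_boolean_py mask t_index out) := by unfold Spec_episodes_from_boolean_py; infer_instance

-- ===== CLAIM (what is proved, stated in full; the proofs are below) =====
def Claim_equal_episodes_from_boolean_py : Prop := ∀ (mask : List Bool) (t_index : List Int), Dom_episodes_from_boolean_py mask t_index → Spec_episodes_from_boolean_py mask t_index (episodes_from_boolean_py mask t_index)

-- ===== LEMMAS AND PROOFS =====

-- recursive characterisation of B's "starts" list, parameterised by the previous row
def sFrom (p : Option (Bool × Int)) : List (Bool × Int) → List Int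
  | [] => []
  | (on, t) :: rs => (if on && !prevAdj t p then [t] else []) ++ sFrom (some (on, t)) rs

-- recursive characterisation of B's "ends" list (looks at the next row)
def eTo : List (Bool × Int) → List Int
  | [] => []
  | (on, t) :: rs => (if on && !nextAdj t rs.head? then [t] else []) ++ eTo rs

lemma sFrom_false (x : Int) (rs : List (Bool × Int)) :
    sFrom (some (false, x)) rs = sFrom none rs := by
  cases rs with
  | nil => rfl
  | cons r rs' => obtain ⟨on, t⟩ := r; simp [sFrom, prevAdj]

lemma starts_eq (rows : List (Bool × Int)) : ∀ (p : Option (Bool × Int)),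
    ((rows.zip (p :: rows.dropLast.map some)).filter
        (fun x => x.1.1 && !prevAdj x.1.2 x.2)).map (fun x => x.1.2) = sFrom p rows := by
  induction rows with
  | nil => intro p; simp [sFrom]
  | cons r rs ih =>
    intro p
    obtain ⟨on, t⟩ := r
    cases rs with
    | nil =>
      by_cases hb : (on && !prevAdj t p) = true <;>
        simp [sFrom, hb]
    | cons r2 rs2 =>
      have hdl : (List.dropLast ((on, t) :: r2 :: rs2)).map some =
          some (on, t) :: (List.dropLast (r2 :: rs2)).map some := by simp
      rw [hdl, List.zip_cons_cons, List.filter_cons]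
      have htail := ih (some (on, t))
      simp at htail
      by_cases hb : (on && !prevAdj t p) = true <;>
        simp only [sFrom] <;> simp [hb, htail] <;>
        (obtain ⟨on2, t2⟩ := r2; simp [sFrom])

lemma ends_eq (rows : List (Bool × Int)) :
    ((rows.zip ((rows.drop 1).map some ++ [none])).filter
        (fun x => x.1.1 && !nextAdj x.1.2 x.2)).map (fun x => x.1.2) = eTo rows := by
  induction rows with
  | nil => simp [eTo]
  | cons r rs ih =>
    obtain ⟨on, t⟩ := r
    cases rs with
    | nil =>
      simp only [List.drop, List.map_nil, List.nil_append, List.zip_cons_cons,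
        List.zip_nil_left, List.filter_cons, eTo, List.head?]
      by_cases hb : (on && !nextAdj t none) = true <;> simp [hb]
    | cons r2 rs2 =>
      have hsh : ((r2 :: rs2).map some ++ [none]) = some r2 :: (rs2.map some ++ [none]) := by
        simp
      rw [show List.drop 1 ((on, t) :: r2 :: rs2) = r2 :: rs2 from rfl, hsh,
        List.zip_cons_cons, List.filter_cons]
      have htail := ih
      rw [show List.drop 1 (r2 :: rs2) = rs2 from rfl] at htail
      by_cases hb : (on && !nextAdj t (some r2)) = true <;>
        simp only [eTo, List.head?] <;> simp [hb, htail] <;>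
        (obtain ⟨on2, t2⟩ := r2; cases rs2 <;> simp [eTo, List.head?])

lemma goA_char (rows : List (Bool × Int)) :
    (∀ acc, goA rows acc none none = acc ++ (sFrom none rows).zip (eTo rows))
    ∧ (∀ acc s p, goA rows acc (some s) (some p) =
        acc ++ (s :: sFrom (some (true, p)) rows).zip (eTo ((true, p) :: rows))) := by
  induction rows with
  | nil =>
    constructor
    · intro acc; simp [goA, sFrom, eTo]
    · intro acc s p; simp [goA, sFrom, eTo, nextAdj]
  | cons r rs ih =>
    obtain ⟨on, t⟩ := r
    constructor
    · intro acc
      cases on with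
      | false =>
        rw [show goA ((false, t) :: rs) acc none none = goA rs acc none none from rfl, ih.1]
        have hs : sFrom none ((false, t) :: rs) = sFrom none rs := by
          simp [sFrom, prevAdj, sFrom_false]
        have he : eTo ((false, t) :: rs) = eTo rs := by simp [eTo]
        rw [hs, he]
      | true =>
        rw [show goA ((true, t) :: rs) acc none none = goA rs acc (some t) (some t) from rfl,
          ih.2]
        have hs : sFrom none ((true, t) :: rs) = t :: sFrom (some (true, t)) rs := by
          simp [sFrom, prevAdj]
        rw [hs]
    · intro acc s p
      cases on with
      | false =>
        rw [show goA ((false, t) :: rs) acc (some s) (some p) =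
            goA rs (acc ++ [(s, p)]) none none from rfl, ih.1]
        have hs : sFrom (some (true, p)) ((false, t) :: rs) = sFrom none rs := by
          simp [sFrom, sFrom_false]
        have he : eTo ((true, p) :: (false, t) :: rs) = p :: eTo ((false, t) :: rs) := by
          simp [eTo, nextAdj, List.head?]
        have he2 : eTo ((false, t) :: rs) = eTo rs := by simp [eTo]
        rw [hs, he, he2, List.zip_cons_cons, List.append_assoc]
        rfl
      | true =>
        by_cases h : t = p + 1
        · rw [show goA ((true, t) :: rs) acc (some s) (some p) =
              (if t = p + 1 then goA rs acc (some s) (some t)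
               else goA rs (acc ++ [(s, p)]) (some t) (some t)) from rfl, if_pos h, ih.2]
          have hs : sFrom (some (true, p)) ((true, t) :: rs) = sFrom (some (true, t)) rs := by
            simp [sFrom, prevAdj, h]
          have he : eTo ((true, p) :: (true, t) :: rs) = eTo ((true, t) :: rs) := by
            simp [eTo, nextAdj, List.head?, h]
          rw [hs, he]
        · rw [show goA ((true, t) :: rs) acc (some s) (some p) =
              (if t = p + 1 then goA rs acc (some s) (some t)
               else goA rs (acc ++ [(s, p)]) (some t) (some t)) from rfl, if_neg h, ih.2]
          have hs : sFrom (some (true, p)) ((true, t) :: rs) =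
              t :: sFrom (some (true, t)) rs := by
            simp [sFrom, prevAdj, h]
          have he : eTo ((true, p) :: (true, t) :: rs) = p :: eTo ((true, t) :: rs) := by
            have hne : ¬ t = p + 1 := h
            simp only [eTo, List.head?, nextAdj]
            simp [hne]
          rw [hs, he, List.zip_cons_cons, List.append_assoc]
          rfl

-- ===== VERDICT (by name: the statement is the Claim_ definition above) =====
theorem episodes_from_boolean_py_spec : Claim_equal_episodes_from_boolean_py := by
  intro mask t_index _
  show episodes_from_boolean_py mask t_index = episodes_from_boolean_py_alt mask t_index
  have hB : episodes_from_boolean_py_alt mask t_index =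
      ((((mask.zip t_index).zip (none :: (mask.zip t_index).dropLast.map some)).filter
          (fun x => x.1.1 && !prevAdj x.1.2 x.2)).map (fun x => x.1.2)).zip
      ((((mask.zip t_index).zip (((mask.zip t_index).drop 1).map some ++ [none])).filter
          (fun x => x.1.1 && !nextAdj x.1.2 x.2)).map (fun x => x.1.2)) := rfl
  rw [hB, starts_eq _ none, ends_eq]
  show goA (mask.zip t_index) [] none none = _
  rw [(goA_char (mask.zip t_index)).1]
  rfl
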